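-- pv_equiv track=rewrite | github.com/Moosieus/Squad-Discord-Mortar-Bot | MortarBot/SquadMortarCalc/mortar.py | getDistRange
-- ===== SOURCE A (Python) =====
-- class OutOfRange(Exception):
--     pass
--
-- DistRange = [(50, 100), (100, 150), (150, 200),
--              (200, 250), (250, 300), (300, 350),
--              (350, 400), (400, 450),
--              (450, 500), (500, 550), (550, 600),
--              (600, 650), (650, 700), (700, 750),
--              (750, 800), (800, 850), (850, 900),
--              (900, 950), (950, 1000), (1000, 1050),
--              (1050, 1100), (1100, 1150), (1150, 1200),
--              (1200, 1250)]
--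
-- def getDistRange(dist):
--     try:
--         if (dist > 1250.0):
--             raise OutOfRange
--         elif (dist < 50):
--             raise OutOfRange
--         else:
--             for range in DistRange:
--                 if (range[0] <= dist and range[1] >= dist):
--                     return DistRange.index(range)
--     except OutOfRange:
--         raise OutOfRange
-- ===== SOURCE B (Python) =====
-- def getDistRange(dist):
--     if dist > 1250.0:
--         raise OutOfRange
--     if dist < 50:
--         raise OutOfRange
--     # smallest bucket index i with 50+50*i <= dist <= 100+50*i, clamped at 0;
--     # ceil((dist-100)/50) computed as -((100-dist)//50)
--     return max(0, -((100 - dist) // 50))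
--
-- class OutOfRange(Exception):
--     pass
-- ===== Notes on version B (the rewrite author's own statement) =====
-- stated objective: simpler
-- what changed: Replaced the 24-entry DistRange table scan and list.index call with a closed-form O(1) arithmetic bucket computation max(0, ceil((dist-100)/50)).
import Mathlib
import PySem

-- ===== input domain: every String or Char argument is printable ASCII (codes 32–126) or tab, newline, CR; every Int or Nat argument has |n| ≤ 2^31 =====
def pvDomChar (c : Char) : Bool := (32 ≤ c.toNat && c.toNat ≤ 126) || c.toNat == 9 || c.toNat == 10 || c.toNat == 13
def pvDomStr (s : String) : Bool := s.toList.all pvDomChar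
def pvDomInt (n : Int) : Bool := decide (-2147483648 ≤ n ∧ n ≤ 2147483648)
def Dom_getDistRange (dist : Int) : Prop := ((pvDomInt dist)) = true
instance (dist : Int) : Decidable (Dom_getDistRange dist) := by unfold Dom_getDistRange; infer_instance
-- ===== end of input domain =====

-- B replaces A's linear scan of the DistRange table (plus a list.index rescan) with a
-- closed-form arithmetic bucket index; equivalence of return values on 50 <= dist <= 1250.

-- ===== PORT A =====
def pvDistRange : List (Int × Int) :=
  [(50, 100), (100, 150), (150, 200),
   (200, 250), (250, 300), (300, 350),
   (350, 400), (400, 450),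
   (450, 500), (500, 550), (550, 600),
   (600, 650), (650, 700), (700, 750),
   (750, 800), (800, 850), (850, 900),
   (900, 950), (950, 1000), (1000, 1050),
   (1050, 1100), (1100, 1150), (1150, 1200),
   (1200, 1250)]

-- the 'for range in DistRange: if lo <= dist <= hi: return DistRange.index(range)' loop;
-- none = the loop falls through (unreachable under Pre_)
def pvScanA (dist : Int) : List (Int × Int) → Option Int
  | [] => none
  | r :: rest =>
      if r.1 ≤ dist ∧ r.2 ≥ dist then PySem.List.index? pvDistRange r
      else pvScanA dist rest

def getDistRange (dist : Int) : Int :=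
  if dist > 1250 then 0        -- raises OutOfRange: excluded by Pre_
  else if dist < 50 then 0     -- raises OutOfRange: excluded by Pre_
  else (pvScanA dist pvDistRange).getD 0

-- ===== PORT B =====
def getDistRange_alt (dist : Int) : Int :=
  if dist > 1250 then 0        -- raises OutOfRange: excluded by Pre_
  else if dist < 50 then 0     -- raises OutOfRange: excluded by Pre_
  else max 0 (-(PySem.Int.floordiv (100 - dist) 50))

-- ===== PRECONDITION & SPEC =====
-- exactly the inputs on which A returns (outside, A raises OutOfRange)
def Pre_getDistRange (dist : Int) : Prop := 50 ≤ dist ∧ dist ≤ 1250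
instance (dist : Int) : Decidable (Pre_getDistRange dist) := by unfold Pre_getDistRange; infer_instance
def pvWitness_getDistRange : Int := 375

def Spec_getDistRange (dist : Int) (out : Int) : Prop := out = getDistRange_alt dist
instance (dist : Int) (out : Int) : Decidable (Spec_getDistRange dist out) := by unfold Spec_getDistRange; infer_instance

-- ===== CLAIM (what is proved, stated in full; the proofs are below) =====
def Claim_equal_getDistRange : Prop := ∀ (dist : Int), Dom_getDistRange dist → Pre_getDistRange dist → Spec_getDistRange dist (getDistRange dist)

-- ===== LEMMAS AND PROOFS =====

-- ===== VERDICT (by name: the statement is the Claim_ definition above) =====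
-- finite check: A = B at 50 + n for every n < 1201
set_option maxRecDepth 100000 in
theorem pvAll : ∀ n < 1201, getDistRange (50 + (n : Nat)) = getDistRange_alt (50 + (n : Nat)) := by
  decide

-- ===== VERDICT =====
theorem getDistRange_spec : Claim_equal_getDistRange := by
  intro dist _ hpre
  unfold Spec_getDistRange
  obtain ⟨h1, h2⟩ := hpre
  have hn : dist = 50 + ((dist - 50).toNat : Int) := by omega
  have hlt : (dist - 50).toNat < 1201 := by omega
  rw [hn]
  exact pvAll _ hlt
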